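-- pv_equiv track=rewrite | github.com/seoeun9595/algorithmStudy | 프로그래머스/unrated/120863. 다항식 더하기/다항식 더하기.py | solution
-- ===== SOURCE A (Python) =====
-- def solution(polynomial):
--     lst = polynomial.split(" + ")
--     x = [i for i in lst if "x" in i]
--     num = [i for i in lst if "x" not in i]
--
--     numsum = str(sum([int(i) for i in num]))
--
--     xsum = 0
--     for i in x:
--         if len(i) > 1:
--             xsum += int(i[:-1])
--         elif len(i) == 1:
--             xsum += 1
--
--     xstr = str(xsum)
--
--     if xstr == "0":
--         return numsum
--     elif xstr == "1":
--         if numsum == "0":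
--             return ("x")
--         else:
--             return ("x + " + numsum)
--     else:
--         if numsum == "0":
--             return (xstr + "x")
--         else:
--             return (xstr + "x + " + numsum)
-- ===== SOURCE B (Python) =====
-- def solution(polynomial):
--     # Evaluate the polynomial at x=t; each token contributes coeff*t or its constant.
--     def value_at(tok, t):
--         if "x" in tok:
--             return (1 if tok == "x" else int(tok[:-1])) * t
--         return int(tok)
--
--     toks = polynomial.split(" + ")
--     s0 = sum(value_at(tok, 0) for tok in toks)   # P(0) = constant part
--     s1 = sum(value_at(tok, 1) for tok in toks)   # P(1) = xsum + constant part
--     xsum = s1 - s0                               # interpolation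
--     parts = ([] if xsum == 0 else ["x" if xsum == 1 else f"{xsum}x"]) \
--           + ([] if s0 == 0 else [str(s0)])
--     return " + ".join(parts) or "0"
-- ===== Notes on version B (the rewrite author's own statement) =====
-- stated objective: alternative
-- what changed: B recovers the coefficients by interpolation: it evaluates the polynomial at x=0 and x=1 (a uniform per-token value function, no bucketing of tokens), takes numsum = P(0) and xsum = P(1) - P(0), and renders the result by joining a list of nonzero term strings, instead of A's two filter passes into x/constant buckets plus a nested if/else formatting tree.
import Mathlib
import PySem

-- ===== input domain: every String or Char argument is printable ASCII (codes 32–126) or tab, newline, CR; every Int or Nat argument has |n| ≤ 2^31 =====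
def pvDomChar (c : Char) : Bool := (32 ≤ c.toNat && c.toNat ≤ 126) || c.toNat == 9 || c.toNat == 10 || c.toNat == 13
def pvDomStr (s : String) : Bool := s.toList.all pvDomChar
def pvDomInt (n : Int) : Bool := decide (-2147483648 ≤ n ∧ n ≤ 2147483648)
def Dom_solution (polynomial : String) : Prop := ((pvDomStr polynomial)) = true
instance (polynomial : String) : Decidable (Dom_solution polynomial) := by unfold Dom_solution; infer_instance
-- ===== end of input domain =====

-- B recovers the coefficients by interpolation — evaluate the polynomial at x=0 and x=1,
-- take numsum = P(0) and xsum = P(1) - P(0) — and renders a joined parts list (objective: alternative).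


-- ===== PORT A =====
-- shared helper: int(s) with .getD 0 — Pre_solution guarantees every parse A (or B) performs succeeds
def pvParse (cs : List Char) : Int := (PySem.Int.ofChars? cs).getD 0

-- A's x-loop body: if len(i) > 1: xsum += int(i[:-1]) elif len(i) == 1: xsum += 1
def aXStep (acc : Int) (i : List Char) : Int :=
  if PySem.Chars.len i > 1 then acc + pvParse i.dropLast
  else if PySem.Chars.len i = 1 then acc + 1 else acc

-- literal port of A over code points
def solution (polynomial : String) : String :=
  let lst := PySem.Chars.splitOn polynomial.toList (" + ".toList)
  let x := lst.filter (fun i => PySem.Chars.isIn ['x'] i)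
  let num := lst.filter (fun i => !PySem.Chars.isIn ['x'] i)
  let numsum := PySem.Int.toChars ((num.map pvParse).sum)
  let xsum : Int := x.foldl aXStep 0
  let xstr := PySem.Int.toChars xsum
  if xstr = ['0'] then String.mk numsum
  else if xstr = ['1'] then
    if numsum = ['0'] then "x"
    else String.mk ('x' :: ' ' :: '+' :: ' ' :: numsum)
  else
    if numsum = ['0'] then String.mk (xstr ++ ['x'])
    else String.mk (xstr ++ ['x'] ++ (' ' :: '+' :: ' ' :: numsum))

-- ===== PORT B =====
-- Source B's value_at(tok, t): the token's value when the variable is t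
def bValueAt (tok : List Char) (t : Int) : Int :=
  if PySem.Chars.isIn ['x'] tok then
    (if tok = ['x'] then 1 else pvParse tok.dropLast) * t
  else pvParse tok

-- port of Source B: evaluate at 0 and 1, interpolate, join the nonzero parts
def solution_alt (polynomial : String) : String :=
  let toks := PySem.Chars.splitOn polynomial.toList (" + ".toList)
  let s0 := (toks.map (fun tok => bValueAt tok 0)).sum
  let s1 := (toks.map (fun tok => bValueAt tok 1)).sum
  let xsum := s1 - s0
  let parts : List (List Char) :=
    (if xsum = 0 then [] else [if xsum = 1 then ['x'] else PySem.Int.toChars xsum ++ ['x']]) ++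
    (if s0 = 0 then [] else [PySem.Int.toChars s0])
  if parts = [] then "0" else String.mk (PySem.Chars.join (' ' :: '+' :: ' ' :: []) parts)

-- ===== PRECONDITION & SPEC =====
-- Pre_solution = exactly the inputs on which the Python A returns normally: every split token
-- that A feeds to int() must parse (ValueError otherwise).
def Pre_solution (polynomial : String) : Prop :=
  ∀ tok ∈ PySem.Chars.splitOn polynomial.toList (" + ".toList),
    (PySem.Chars.isIn ['x'] tok = true →
      tok.length = 1 ∨ (PySem.Int.ofChars? tok.dropLast).isSome = true) ∧
    (PySem.Chars.isIn ['x'] tok = false → (PySem.Int.ofChars? tok).isSome = true)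
instance (polynomial : String) : Decidable (Pre_solution polynomial) := by
  unfold Pre_solution; infer_instance

def pvWitness_solution : String := "3x + 4x + -2"

def Spec_solution (polynomial : String) (out : String) : Prop := out = solution_alt polynomial
instance (polynomial : String) (out : String) : Decidable (Spec_solution polynomial out) := by unfold Spec_solution; infer_instance

-- ===== CLAIM (what is proved, stated in full; the proofs are below) =====
def Claim_equal_solution : Prop := ∀ (polynomial : String), Dom_solution polynomial → Pre_solution polynomial → Spec_solution polynomial (solution polynomial)

-- ===== LEMMAS AND PROOFS =====

-- B's coefficient of an x-token, as a standalone value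
def bCoeff (tok : List Char) : Int := if tok = ['x'] then 1 else pvParse tok.dropLast

-- digit recognition: toDigits 10 m is the single digit d iff m = d
lemma toDigits_eq_digit_iff (m d : Nat) (hd : d < 10) :
    Nat.toDigits 10 m = [Nat.digitChar d] ↔ m = d := by
  constructor
  · intro h
    by_cases hm : m < 10
    · rw [Nat.toDigits_of_lt_base hm] at h
      have hc : m.digitChar = d.digitChar := by simpa using h
      interval_cases m <;> interval_cases d <;> simp_all [Nat.digitChar]
    · exfalso
      have hlen : (Nat.toDigits 10 m).length ≤ 1 := by rw [h]; simp
      have := (Nat.length_toDigits_le_iff (n := m) (by norm_num) (by norm_num)).mp hlen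
      omega
  · intro h; subst h; exact Nat.toDigits_of_lt_base hd

lemma toChars_eq_zero_iff (n : Int) : PySem.Int.toChars n = ['0'] ↔ n = 0 := by
  unfold PySem.Int.toChars
  split_ifs with h
  · simp only [List.cons.injEq]
    constructor
    · rintro ⟨h1, -⟩; exact absurd h1 (by decide)
    · intro h0; omega
  · rw [show ('0' : Char) = Nat.digitChar 0 from rfl,
      toDigits_eq_digit_iff n.toNat 0 (by norm_num)]
    omega

lemma toChars_eq_one_iff (n : Int) : PySem.Int.toChars n = ['1'] ↔ n = 1 := by
  unfold PySem.Int.toChars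
  split_ifs with h
  · simp only [List.cons.injEq]
    constructor
    · rintro ⟨h1, -⟩; exact absurd h1 (by decide)
    · intro h0; omega
  · rw [show ('1' : Char) = Nat.digitChar 1 from rfl,
      toDigits_eq_digit_iff n.toNat 1 (by norm_num)]
    omega

-- per x-token, A's loop body adds exactly B's coefficient
lemma aXStep_eq (a : Int) (tok : List Char) (h : PySem.Chars.isIn ['x'] tok = true) :
    aXStep a tok = a + bCoeff tok := by
  have hinf : ['x'] <:+: tok := (PySem.Chars.isIn_iff_infix _ _).mp h
  have hlen : 1 ≤ tok.length := by simpa using hinf.length_le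
  unfold aXStep bCoeff
  rw [PySem.Chars.len_eq]
  by_cases he : tok = ['x']
  · subst he; simp
  · have h2 : 1 < tok.length := by
      rcases Nat.lt_or_ge 1 tok.length with h' | h'
      · exact h'
      · exact absurd (hinf.sublist.eq_of_length (by simp; omega)).symm he
    rw [if_pos (by exact_mod_cast h2), if_neg he]

-- A's x-loop over the x-tokens sums B's coefficients
lemma xfold_eq_sum (xs : List (List Char)) (a : Int)
    (hx : ∀ tok ∈ xs, PySem.Chars.isIn ['x'] tok = true) :
    xs.foldl aXStep a = a + (xs.map bCoeff).sum := by
  induction xs generalizing a with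
  | nil => simp
  | cons tok rest ih =>
    rw [List.foldl_cons, aXStep_eq a tok (hx tok (by simp)), ih _ (fun t ht => hx t (by simp [ht]))]
    simp [add_assoc]

-- P(0): only the constant tokens survive
lemma sum_value_zero (lst : List (List Char)) :
    (lst.map (fun tok => bValueAt tok 0)).sum =
    ((lst.filter (fun i => !PySem.Chars.isIn ['x'] i)).map pvParse).sum := by
  induction lst with
  | nil => simp
  | cons tok rest ih =>
    by_cases h : PySem.Chars.isIn ['x'] tok = true
    · rw [List.map_cons, List.sum_cons, ih, List.filter_cons_of_neg (by simp [h])]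
      simp [bValueAt, h]
    · have h' : PySem.Chars.isIn ['x'] tok = false := by simpa using h
      rw [List.map_cons, List.sum_cons, ih, List.filter_cons_of_pos (by simp [h'])]
      simp [bValueAt, h']

-- P(1) - P(0): token by token, exactly the x-coefficients remain
lemma sum_value_sub (lst : List (List Char)) :
    (lst.map (fun tok => bValueAt tok 1)).sum - (lst.map (fun tok => bValueAt tok 0)).sum =
    ((lst.filter (fun i => PySem.Chars.isIn ['x'] i)).map bCoeff).sum := by
  induction lst with
  | nil => simp
  | cons tok rest ih =>
    simp only [List.map_cons, List.sum_cons]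
    by_cases h : PySem.Chars.isIn ['x'] tok = true
    · rw [List.filter_cons_of_pos (by simpa using h), List.map_cons, List.sum_cons, ← ih]
      simp only [bValueAt, bCoeff, h, if_true, mul_one, mul_zero]
      ring
    · have h' : PySem.Chars.isIn ['x'] tok = false := by simpa using h
      rw [List.filter_cons_of_neg (by simp [h']), ← ih]
      simp only [bValueAt, h', if_false, Bool.false_eq_true]
      ring

-- the two formatting tails agree for any aggregates X, N
lemma format_eq (X N : Int) :
    (if PySem.Int.toChars X = ['0'] then String.mk (PySem.Int.toChars N)
     else if PySem.Int.toChars X = ['1'] then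
       if PySem.Int.toChars N = ['0'] then "x"
       else String.mk ('x' :: ' ' :: '+' :: ' ' :: PySem.Int.toChars N)
     else
       if PySem.Int.toChars N = ['0'] then String.mk (PySem.Int.toChars X ++ ['x'])
       else String.mk (PySem.Int.toChars X ++ ['x'] ++ (' ' :: '+' :: ' ' :: PySem.Int.toChars N))) =
    (let parts : List (List Char) :=
        (if X = 0 then [] else [if X = 1 then ['x'] else PySem.Int.toChars X ++ ['x']]) ++
        (if N = 0 then [] else [PySem.Int.toChars N]);
     if parts = [] then "0" else String.mk (PySem.Chars.join (' ' :: '+' :: ' ' :: []) parts)) := by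
  by_cases hx0 : X = 0
  · subst hx0
    simp only [toChars_eq_zero_iff]
    by_cases hn0 : N = 0
    · subst hn0; decide
    · simp [hn0, PySem.Chars.join_singleton]
  · by_cases hx1 : X = 1
    · subst hx1
      simp only [(toChars_eq_zero_iff (1 : Int)).not.mpr (by norm_num),
        toChars_eq_one_iff, if_neg (by norm_num : ¬ (1 : Int) = 0)]
      by_cases hn0 : N = 0
      · simp only [hn0, toChars_eq_zero_iff]; decide
      · simp [hn0, (toChars_eq_zero_iff N).not.mpr hn0,
          PySem.Chars.join_cons_cons, PySem.Chars.join_singleton]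
    · simp only [(toChars_eq_zero_iff X).not.mpr hx0, (toChars_eq_one_iff X).not.mpr hx1,
        if_neg hx0, if_neg hx1, if_false]
      by_cases hn0 : N = 0
      · simp [hn0, toChars_eq_zero_iff, PySem.Chars.join_singleton]
      · simp [hn0, (toChars_eq_zero_iff N).not.mpr hn0,
          PySem.Chars.join_cons_cons, PySem.Chars.join_singleton]

-- ===== VERDICT (by name: the statement is the Claim_ definition above) =====
theorem solution_spec : Claim_equal_solution := by
  intro polynomial _ _
  unfold Spec_solution solution solution_alt
  simp only []
  rw [sum_value_sub, sum_value_zero,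
    xfold_eq_sum _ 0 (fun tok ht => List.of_mem_filter ht), zero_add]
  exact format_eq _ _
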